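-- pv_equiv track=rewrite | github.com/Mateus-Redivo/Cod-Python | Rev/LMM_Resol.py | ex27
-- ===== SOURCE A (Python) =====
-- def ex27(texto):
--     """
--     Exercício 27:
--     Crie uma função que analise um texto e retorne um dicionário com:
--     - 'caracteres': total de caracteres
--     - 'palavras': total de palavras
--     - 'linhas': total de linhas
--     - 'vogais': total de vogais
--     Parâmetro:
--       - texto (str): texto para análise
--     Retorno:
--       - dict: dicionário com estatísticas do texto
--     """
--     vogais = "aeiouAEIOU"
--     return {
--         "caracteres": len(texto),
--         "palavras": len(texto.split()),
--         "linhas": texto.count("\n") + 1,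
--         "vogais": sum(1 for c in texto if c in vogais)
--     }
-- ===== SOURCE B (Python) =====
-- def ex27(texto):
--     # Single pass over the characters with four accumulators and an in-word flag,
--     # instead of four separate library scans.
--     vogais_set = set("aeiouAEIOU")
--     caracteres = 0
--     palavras = 0
--     quebras = 0
--     vogais = 0
--     em_palavra = False
--     for c in texto:
--         caracteres += 1
--         if c == "\n":
--             quebras += 1
--         if c in vogais_set:
--             vogais += 1
--         if c.isspace():
--             em_palavra = False
--         else:
--             if not em_palavra:
--                 palavras += 1
--             em_palavra = True
--     return {
--         "caracteres": caracteres,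
--         "palavras": palavras,
--         "linhas": quebras + 1,
--         "vogais": vogais,
--     }
-- ===== Notes on version B (the rewrite author's own statement) =====
-- stated objective: alternative
-- what changed: B replaces A's four separate scans (len, split, count, generator sum) by one explicit loop over the characters keeping four accumulators and an in-word flag for word counting.
import Mathlib
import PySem

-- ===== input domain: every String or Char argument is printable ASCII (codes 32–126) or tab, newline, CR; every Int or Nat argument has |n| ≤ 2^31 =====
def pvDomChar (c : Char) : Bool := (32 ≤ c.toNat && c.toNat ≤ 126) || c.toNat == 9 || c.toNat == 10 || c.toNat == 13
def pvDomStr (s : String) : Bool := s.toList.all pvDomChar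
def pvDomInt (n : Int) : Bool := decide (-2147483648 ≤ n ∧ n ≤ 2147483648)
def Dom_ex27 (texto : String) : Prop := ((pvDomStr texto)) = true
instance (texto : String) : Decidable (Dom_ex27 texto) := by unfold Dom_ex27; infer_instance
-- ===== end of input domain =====

-- B replaces A's four separate scans by one explicit loop over the characters with four
-- accumulators and an in-word flag (alternative decomposition, same O(n) cost).


-- ===== PORT A =====
-- 'c in vogais' is Python's substring test; for the one-char needle it is Str.isIn.
def ex27 (texto : String) : List (String × Int) :=
  let vogais : String := "aeiouAEIOU"
  [("caracteres", PySem.Str.len texto),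
   ("palavras", ((PySem.Str.split₀ texto).length : Int)),
   ("linhas", ((PySem.Str.count texto "\n" : Int) + 1)),
   ("vogais", texto.toList.foldl
      (fun acc c => if PySem.Str.isIn (String.ofList [c]) vogais then acc + 1 else acc) (0 : Int))]

-- ===== PORT B =====
def ex27Vset : PySem.Set Char := PySem.Set.ofList "aeiouAEIOU".toList

-- state: (caracteres, palavras, quebras, vogais, em_palavra)
def ex27Step (s : Int × Int × Int × Int × Bool) (c : Char) : Int × Int × Int × Int × Bool :=
  (s.1 + 1,
   if PySem.Chars.isspace c then s.2.1 else if s.2.2.2.2 then s.2.1 else s.2.1 + 1,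
   if c == '\n' then s.2.2.1 + 1 else s.2.2.1,
   if ex27Vset.contains c then s.2.2.2.1 + 1 else s.2.2.2.1,
   !PySem.Chars.isspace c)

def ex27_alt (texto : String) : List (String × Int) :=
  let r := texto.toList.foldl ex27Step (0, 0, 0, 0, false)
  [("caracteres", r.1),
   ("palavras", r.2.1),
   ("linhas", r.2.2.1 + 1),
   ("vogais", r.2.2.2.1)]

-- ===== PRECONDITION & SPEC =====
def Spec_ex27 (texto : String) (out : List (String × Int)) : Prop := out = ex27_alt texto
instance (texto : String) (out : List (String × Int)) : Decidable (Spec_ex27 texto out) := by unfold Spec_ex27; infer_instance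

-- ===== CLAIM (what is proved, stated in full; the proofs are below) =====
def Claim_equal_ex27 : Prop := ∀ (texto : String), Dom_ex27 texto → Spec_ex27 texto (ex27 texto)

-- ===== LEMMAS AND PROOFS =====

-- word count by rising edges (B's strategy, as a recursive spec)
def wcount : List Char → Bool → Nat
  | [], _ => 0
  | c :: rest, inw =>
    if PySem.Chars.isspace c then wcount rest false
    else (if inw then 0 else 1) + wcount rest true

theorem split₀_go_length (l : List Char) : ∀ (cur : List Char) (acc : List (List Char)),
    (PySem.Chars.split₀.go l cur acc).length
      = acc.length + (if cur.isEmpty then 0 else 1) + wcount l (!cur.isEmpty) := by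
  induction l with
  | nil =>
    intro cur acc
    by_cases hc : cur.isEmpty
    · simp [PySem.Chars.split₀.go, wcount, hc]
    · simp [PySem.Chars.split₀.go, wcount, hc]
  | cons c rest ih =>
    intro cur acc
    simp only [PySem.Chars.split₀.go, wcount]
    by_cases hs : PySem.Chars.isspace c
    · by_cases hc : cur.isEmpty
      · simp [hs, hc, ih]
      · simp [hs, hc, ih]
    · by_cases hc : cur.isEmpty
      · simp [hs, hc, ih]; omega
      · simp [hs, hc, ih]

theorem split₀_length (l : List Char) :
    (PySem.Chars.split₀ l).length = wcount l false := by
  simpa using split₀_go_length l [] []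

-- single-character substring count = list count
theorem count_go_singleton (ch : Char) (l : List Char) : ∀ (fuel acc : Nat),
    l.length ≤ fuel → PySem.Chars.count.go [ch] fuel l acc = acc + l.count ch := by
  induction l with
  | nil => intro fuel acc _; cases fuel <;> simp [PySem.Chars.count.go]
  | cons h t ih =>
    intro fuel acc hf
    cases fuel with
    | zero => simp at hf
    | succ n =>
      simp only [PySem.Chars.count.go]
      have hpre : ([ch].isPrefixOf (h :: t)) = (ch == h) := by simp [List.isPrefixOf]
      rw [hpre]
      by_cases he : ch = h
      · subst he
        simp only [beq_self_eq_true, if_true]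
        have hd : List.drop [ch].length (ch :: t) = t := by simp
        rw [hd, ih n (acc + 1) (by simpa using hf)]
        simp
        omega
      · have hb : (ch == h) = false := beq_eq_false_iff_ne.mpr he
        have hb2 : (h == ch) = false := beq_eq_false_iff_ne.mpr (Ne.symm he)
        rw [hb]
        simp only [Bool.false_eq_true, if_false]
        rw [ih n acc (by simpa using hf)]
        simp [List.count_cons, hb2]
    
-- first match case done
theorem count_singleton (ch : Char) (l : List Char) :
    PySem.Chars.count l [ch] = l.count ch := by
  simp [PySem.Chars.count, count_go_singleton ch l l.length 0 le_rfl]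

-- one-char 'in' is membership
theorem find_go_singleton (c : Char) (l : List Char) : ∀ (k : Nat),
    (PySem.Chars.find.go [c] l k != -1) = l.contains c := by
  induction l with
  | nil => intro k; simp [PySem.Chars.find.go]
  | cons h t ih =>
    intro k
    simp only [PySem.Chars.find.go]
    have hpre : ([c].isPrefixOf (h :: t)) = (c == h) := by simp [List.isPrefixOf]
    rw [hpre]
    by_cases he : c = h
    · simp [he]
    · have hb : (c == h) = false := beq_eq_false_iff_ne.mpr he
      have hb2 : (h == c) = false := beq_eq_false_iff_ne.mpr (Ne.symm he)
      rw [hb]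
      simp only [Bool.false_eq_true, if_false]
      simp [ih]
      exact fun hh => absurd hh he

theorem isIn_singleton (c : Char) (l : List Char) :
    PySem.Chars.isIn [c] l = l.contains c := by
  simp [PySem.Chars.isIn, PySem.Chars.find, find_go_singleton]

theorem vset_eq : ex27Vset = "aeiouAEIOU".toList := by decide

-- the grand invariant for B's single fold
theorem ex27_fold (l : List Char) :
    ∀ (ca pa qa va : Int) (inw : Bool),
    l.foldl ex27Step (ca, pa, qa, va, inw)
      = (ca + l.length,
         pa + wcount l inw,
         qa + l.count '\n',
         va + (l.countP (fun c => ex27Vset.contains c) : Int),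
         l.foldl (fun _ c => !PySem.Chars.isspace c) inw) := by
  induction l with
  | nil => intro ca pa qa va inw; simp
  | cons c rest ih =>
    intro ca pa qa va inw
    simp only [List.foldl_cons, ex27Step, wcount, List.count_cons, List.countP_cons]
    rw [ih]
    simp only [Prod.mk.injEq]
    by_cases hn : c = '\n'
    · subst hn
      have h1 : PySem.Chars.isspace '\n' = true := by decide
      cases inw <;> by_cases hv : '\n' ∈ ex27Vset <;>
        simp [h1, hv] <;> push_cast <;> omega
    · by_cases hs : PySem.Chars.isspace c <;> cases inw <;> by_cases hv : c ∈ ex27Vset <;>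
        simp [hs, hv, hn] <;> push_cast <;> omega

-- ===== VERDICT (by name: the statement is the Claim_ definition above) =====
theorem ex27_spec : Claim_equal_ex27 := by
  intro texto _
  unfold Spec_ex27 ex27 ex27_alt
  rw [ex27_fold]
  simp only [PySem.Str.len, PySem.Str.split₀, PySem.Str.count, PySem.Str.isIn_eq,
    List.length_map, split₀_length, vset_eq, String.toList_ofList,
    show ("\n".toList = ['\n']) from rfl, count_singleton, isIn_singleton]
  rw [PySem.List.foldl_if_add_one]
  simp only [PySem.Set.contains, List.count, zero_add]
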